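-- pv_equiv track=rewrite | github.com/Chaddyfynn/quantum-cryptography | source/bb84_single_photon_simulator.py | get_system_states
-- ===== SOURCE A (Python) =====
-- def get_system_states(bit, tx, rx):
--     system_states = []
--     for i in range(0, len(bit)):
--         inter = "ERROR"
--         if not bit[i]:
--             if not tx[i]:
--                 if not rx[i]:
--                     inter = '0AA'
--                 else:
--                     inter = '0AB'
--             else:
--                 if not rx[i]:
--                     inter = '0BA'
--                 else:
--                     inter = '0BB'
--         else:
--             if not tx[i]:
--                 if not rx[i]:
--                     inter = '1AA'
--                 else:
--                     inter = '1AB'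
--             else:
--                 if not rx[i]:
--                     inter = '1BA'
--                 else:
--                     inter = '1BB'
--         system_states.append(inter)
--     return system_states
-- ===== SOURCE B (Python) =====
-- def get_system_states(bit, tx, rx):
--     return [('1' if bit[i] else '0') + ('B' if tx[i] else 'A') + ('B' if rx[i] else 'A')
--             for i in range(len(bit))]
-- ===== Notes on version B (the rewrite author's own statement) =====
-- stated objective: simpler
-- what changed: Replaces the nested 8-way boolean branch tree with a single comprehension that builds each code compositionally from three independent one-character choices; the unreachable 'ERROR' sentinel and accumulator loop disappear.
import Mathlib
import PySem

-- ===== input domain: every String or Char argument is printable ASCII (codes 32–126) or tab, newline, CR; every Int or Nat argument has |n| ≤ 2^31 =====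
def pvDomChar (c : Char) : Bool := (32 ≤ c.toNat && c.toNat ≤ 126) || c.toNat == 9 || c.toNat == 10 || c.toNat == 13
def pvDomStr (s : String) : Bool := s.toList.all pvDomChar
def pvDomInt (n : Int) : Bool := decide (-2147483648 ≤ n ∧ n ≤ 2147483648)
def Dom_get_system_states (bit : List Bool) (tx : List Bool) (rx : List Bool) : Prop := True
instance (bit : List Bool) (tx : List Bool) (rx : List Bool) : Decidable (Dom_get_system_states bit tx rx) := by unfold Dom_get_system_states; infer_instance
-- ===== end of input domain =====

-- B replaces A's nested 8-way branch tree with a comprehension building each code from three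
-- independent one-character choices (objective: simpler). Both raise IndexError when tx or rx
-- is shorter than bit; Pre_ excludes exactly those inputs.

-- ===== PORT A =====
def get_system_states (bit : List Bool) (tx : List Bool) (rx : List Bool) : List String :=
  (PySem.List.pyRange 0 (bit.length : Int) 1).foldl (fun acc i =>
    let b := PySem.List.pyGetD bit i false
    let t := PySem.List.pyGetD tx i false
    let r := PySem.List.pyGetD rx i false
    let inter :=
      if !b then
        if !t then (if !r then "0AA" else "0AB")
        else (if !r then "0BA" else "0BB")
      else
        if !t then (if !r then "1AA" else "1AB")
        else (if !r then "1BA" else "1BB")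
    acc ++ [inter]) []

-- ===== PORT B =====
def get_system_states_alt (bit : List Bool) (tx : List Bool) (rx : List Bool) : List String :=
  (PySem.List.pyRange 0 (bit.length : Int) 1).map (fun i =>
    (if PySem.List.pyGetD bit i false then "1" else "0") ++
    (if PySem.List.pyGetD tx i false then "B" else "A") ++
    (if PySem.List.pyGetD rx i false then "B" else "A"))

-- ===== PRECONDITION & SPEC =====
-- Python A (and B) raise IndexError when tx or rx is shorter than bit; exactly those are excluded.
def Pre_get_system_states (bit : List Bool) (tx : List Bool) (rx : List Bool) : Prop :=
  bit.length ≤ tx.length ∧ bit.length ≤ rx.length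
instance (bit : List Bool) (tx : List Bool) (rx : List Bool) : Decidable (Pre_get_system_states bit tx rx) := by unfold Pre_get_system_states; infer_instance
def pvWitness_get_system_states : List Bool × List Bool × List Bool :=
  ([true, false], [false, true], [true, true])
def Spec_get_system_states (bit : List Bool) (tx : List Bool) (rx : List Bool) (out : List String) : Prop := out = get_system_states_alt bit tx rx
instance (bit : List Bool) (tx : List Bool) (rx : List Bool) (out : List String) : Decidable (Spec_get_system_states bit tx rx out) := by unfold Spec_get_system_states; infer_instance

-- ===== CLAIM (what is proved, stated in full; the proofs are below) =====
def Claim_equal_get_system_states : Prop := ∀ (bit : List Bool) (tx : List Bool) (rx : List Bool), Dom_get_system_states bit tx rx → Pre_get_system_states bit tx rx → Spec_get_system_states bit tx rx (get_system_states bit tx rx)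

-- ===== LEMMAS AND PROOFS =====

-- the per-index bodies of the two ports compute the same string
theorem pv_body_eq (bit tx rx : List Bool) (i : Int) :
    (let b := PySem.List.pyGetD bit i false
     let t := PySem.List.pyGetD tx i false
     let r := PySem.List.pyGetD rx i false
     if !b then
       if !t then (if !r then "0AA" else "0AB")
       else (if !r then "0BA" else "0BB")
     else
       if !t then (if !r then "1AA" else "1AB")
       else (if !r then "1BA" else "1BB")) =
    (if PySem.List.pyGetD bit i false then "1" else "0") ++
    (if PySem.List.pyGetD tx i false then "B" else "A") ++
    (if PySem.List.pyGetD rx i false then "B" else "A") := by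
  cases PySem.List.pyGetD bit i false <;>
  cases PySem.List.pyGetD tx i false <;>
  cases PySem.List.pyGetD rx i false <;> rfl

-- ===== VERDICT (by name: the statement is the Claim_ definition above) =====
theorem get_system_states_spec : Claim_equal_get_system_states := by
  intro bit tx rx _ _
  unfold Spec_get_system_states get_system_states get_system_states_alt
  rw [PySem.List.foldl_append_singleton_eq_map]
  exact List.map_congr_left (fun i _ => pv_body_eq bit tx rx i)
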